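-- pv_equiv track=rewrite | github.com/mohammadfaiizan/ProjectI | DSA/Matrix/001_matrix_basics_and_operations.py | set_boundary_zeros
-- ===== SOURCE A (Python) =====
-- from typing import List, Tuple, Optional
--
-- def set_boundary_zeros(matrix: List[List[int]]) -> List[List[int]]:
--     """Set all boundary elements to zero
--     Time: O(m*n), Space: O(1)
--     """
--     if not matrix or not matrix[0]:
--         return matrix
--
--     rows, cols = len(matrix), len(matrix[0])
--
--     # Set first and last row to zero
--     for j in range(cols):
--         matrix[0][j] = 0
--         matrix[rows - 1][j] = 0
--
--     # Set first and last column to zero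
--     for i in range(rows):
--         matrix[i][0] = 0
--         matrix[i][cols - 1] = 0
--
--     return matrix
-- ===== SOURCE B (Python) =====
-- def set_boundary_zeros(matrix):
--     """Set all boundary elements to zero: one full nested scan with a
--     boundary predicate instead of separate edge loops (mutates in place)."""
--     if not matrix or not matrix[0]:
--         return matrix
--     rows, cols = len(matrix), len(matrix[0])
--     for i, row in enumerate(matrix):
--         for j in range(cols):
--             if i == 0 or i == rows - 1 or j == 0 or j == cols - 1:
--                 row[j] = 0
--     return matrix
-- ===== Notes on version B (the rewrite author's own statement) =====
-- stated objective: simpler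
-- what changed: Replaces A's two separate edge loops (first/last row pass, then first/last column pass, each writing two cells per step) with a single nested scan over the whole matrix that zeroes a cell exactly when the boundary predicate i==0 or i==rows-1 or j==0 or j==cols-1 holds.
import Mathlib
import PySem

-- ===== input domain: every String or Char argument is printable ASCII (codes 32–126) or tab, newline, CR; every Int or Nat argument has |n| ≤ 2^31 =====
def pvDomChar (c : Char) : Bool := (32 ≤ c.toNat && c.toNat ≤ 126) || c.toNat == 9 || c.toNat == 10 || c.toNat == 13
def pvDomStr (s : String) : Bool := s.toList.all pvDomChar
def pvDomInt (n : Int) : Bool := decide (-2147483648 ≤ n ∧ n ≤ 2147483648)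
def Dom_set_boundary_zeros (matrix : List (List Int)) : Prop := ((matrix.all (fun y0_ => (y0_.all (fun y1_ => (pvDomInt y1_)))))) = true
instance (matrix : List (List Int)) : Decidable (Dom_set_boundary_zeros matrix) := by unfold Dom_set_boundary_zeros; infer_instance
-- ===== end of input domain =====

-- B replaces A's two edge-only loops by one full nested scan guarded by a
-- boundary predicate (simpler decomposition, not faster). Both mutate the
-- argument in place in Python; the ports model the returned value (which is
-- the same mutated object in both).

-- ===== PORT A =====
-- `matrix[i][j] = 0` on an in-range index: functional update of row i at j
-- (no-op when out of range; Pre_ excludes the inputs where Python raises).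
def zset (m : List (List Int)) (i j : Nat) : List (List Int) :=
  m.set i ((m.getD i []).set j 0)

def set_boundary_zeros (matrix : List (List Int)) : List (List Int) :=
  if matrix = [] ∨ matrix.headD [] = [] then matrix
  else
    let rows := matrix.length
    let cols := (matrix.headD []).length
    -- for j in range(cols): matrix[0][j] = 0; matrix[rows-1][j] = 0
    let m1 := (List.range cols).foldl (fun m j => zset (zset m 0 j) (rows - 1) j) matrix
    -- for i in range(rows): matrix[i][0] = 0; matrix[i][cols-1] = 0
    (List.range rows).foldl (fun m i => zset (zset m i 0) i (cols - 1)) m1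

-- ===== PORT B =====
-- inner loop of B: for j in range(cols): if boundary: row[j] = 0
def bzero (rows cols i : Nat) (row : List Int) : List Int :=
  (List.range cols).foldl
    (fun r j => if i = 0 ∨ i = rows - 1 ∨ j = 0 ∨ j = cols - 1 then r.set j 0 else r) row

def set_boundary_zeros_alt (matrix : List (List Int)) : List (List Int) :=
  if matrix = [] ∨ matrix.headD [] = [] then matrix
  else
    let rows := matrix.length
    let cols := (matrix.headD []).length
    -- for i, row in enumerate(matrix): …
    matrix.mapIdx (fun i row => bzero rows cols i row)

-- ===== PRECONDITION & SPEC =====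
-- Pre_ excludes exactly the ragged matrices on which Python A raises
-- IndexError: a non-empty matrix with non-empty first row but some row
-- shorter than the first row (A indexes every row at 0 and cols-1, and the
-- last row at every j < cols).
def Pre_set_boundary_zeros (matrix : List (List Int)) : Prop :=
  matrix = [] ∨ matrix.headD [] = [] ∨
    ∀ row ∈ matrix, (matrix.headD []).length ≤ row.length

instance (matrix : List (List Int)) : Decidable (Pre_set_boundary_zeros matrix) := by
  unfold Pre_set_boundary_zeros; infer_instance

def pvWitness_set_boundary_zeros : List (List Int) := [[1, 2, 3], [4, 5, 6], [7, 8, 9]]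

def Spec_set_boundary_zeros (matrix : List (List Int)) (out : List (List Int)) : Prop := out = set_boundary_zeros_alt matrix
instance (matrix : List (List Int)) (out : List (List Int)) : Decidable (Spec_set_boundary_zeros matrix out) := by unfold Spec_set_boundary_zeros; infer_instance

-- ===== CLAIM (what is proved, stated in full; the proofs are below) =====
def Claim_equal_set_boundary_zeros : Prop := ∀ (matrix : List (List Int)), Dom_set_boundary_zeros matrix → Pre_set_boundary_zeros matrix → Spec_set_boundary_zeros matrix (set_boundary_zeros matrix)

-- ===== LEMMAS AND PROOFS =====

def rowZ (n : Nat) (r : List Int) : List Int :=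
  (List.range n).foldl (fun r j => r.set j 0) r

theorem rowZ_length (n : Nat) (r : List Int) : (rowZ n r).length = r.length := by
  induction n with
  | zero => rfl
  | succ n ih =>
    simp only [rowZ, List.range_succ, List.foldl_append, List.foldl_cons, List.foldl_nil] at *
    simpa using ih

theorem rowZ_get? (n : Nat) (r : List Int) (j' : Nat) :
    (rowZ n r)[j']? = if j' < n ∧ j' < r.length then some 0 else r[j']? := by
  induction n with
  | zero => simp [rowZ]
  | succ n ih =>
    have hlen := rowZ_length n r
    simp only [rowZ, List.range_succ, List.foldl_append, List.foldl_cons, List.foldl_nil] at *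
    rw [List.getElem?_set, hlen]
    by_cases h : j' = n
    · subst h
      by_cases hl : j' < r.length
      · simp [hl]
      · rw [if_pos rfl, if_neg hl, if_neg (by omega), List.getElem?_eq_none (by omega)]
    · rw [if_neg (by omega), ih]
      split_ifs <;> first | rfl | omega

theorem zset_get? (m : List (List Int)) (i j i' : Nat) :
    (zset m i j)[i']? = if i' = i then (m[i]?).map (fun r => r.set j 0) else m[i']? := by
  rw [zset, List.getElem?_set]
  by_cases h : i = i'
  · subst h
    by_cases hl : i < m.length
    · simp [hl, List.getD]
    · rw [if_pos rfl, if_neg hl, if_pos rfl, List.getElem?_eq_none (by omega)]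
      rfl
  · simp [h, Ne.symm h]

theorem fold1_get? (m0 : List (List Int)) (R n : Nat) : ∀ i',
    ((List.range n).foldl (fun m j => zset (zset m 0 j) (R - 1) j) m0)[i']? =
      if i' = 0 ∨ i' = R - 1 then (m0[i']?).map (rowZ n) else m0[i']? := by
  induction n with
  | zero =>
    intro i'
    simp only [List.range_zero, List.foldl_nil]
    split_ifs with h
    · cases m0[i']? <;> rfl
    · rfl
  | succ n ih =>
    intro i'
    simp only [List.range_succ, List.foldl_append, List.foldl_cons, List.foldl_nil]
    rw [zset_get?]
    have hrz : ∀ (o : Option (List Int)), (o.map (rowZ n)).map (fun r => r.set n 0) = o.map (rowZ (n+1)) := by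
      intro o; cases o with
      | none => rfl
      | some r =>
        simp only [Option.map_some]
        congr 1
        simp [rowZ, List.range_succ]
    by_cases h1 : i' = R - 1
    · rw [if_pos h1, zset_get?]
      by_cases h0 : R - 1 = 0
      · rw [if_pos h0, ih 0, if_pos (Or.inl rfl), hrz, h1, h0, if_pos (Or.inl rfl)]
        cases m0[(0:Nat)]? with
        | none => rfl
        | some r =>
          simp only [Option.map_some]
          congr 1
          simp [rowZ, List.range_succ, List.set_set]
      · rw [if_neg h0, ih (R-1), if_pos (Or.inr rfl), hrz, h1, if_pos (Or.inr rfl)]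
    · rw [if_neg h1, zset_get?]
      by_cases h0 : i' = 0
      · subst h0
        rw [if_pos rfl, ih 0, if_pos (Or.inl rfl), hrz, if_pos (Or.inl rfl)]
      · rw [if_neg h0, ih i', if_neg (by tauto), if_neg (by tauto)]

theorem fold2_get? (m0 : List (List Int)) (c n : Nat) : ∀ i',
    ((List.range n).foldl (fun m i => zset (zset m i 0) i (c - 1)) m0)[i']? =
      if i' < n then (m0[i']?).map (fun r => (r.set 0 0).set (c - 1) 0) else m0[i']? := by
  induction n with
  | zero => intro i'; simp
  | succ n ih =>
    intro i'
    simp only [List.range_succ, List.foldl_append, List.foldl_cons, List.foldl_nil]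
    rw [zset_get?]
    by_cases h : i' = n
    · subst h
      rw [if_pos rfl, zset_get?, if_pos rfl, ih, if_neg (by omega), if_pos (by omega)]
      cases m0[i']? <;> rfl
    · rw [if_neg h, zset_get?, if_neg h, ih]
      split_ifs with h1 h2 h2 <;> first | rfl | omega

theorem foldl_ifset_length (P : Nat → Prop) [DecidablePred P] (r : List Int) (n : Nat) :
    ((List.range n).foldl (fun r j => if P j then r.set j 0 else r) r).length = r.length := by
  induction n with
  | zero => rfl
  | succ k ihk =>
    simp only [List.range_succ, List.foldl_append, List.foldl_cons, List.foldl_nil] at *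
    split_ifs <;> simpa using ihk

-- generic form of B's inner loop with an arbitrary predicate on j
theorem foldl_ifset_get? (P : Nat → Prop) [DecidablePred P] (r : List Int) (n : Nat) : ∀ j',
    ((List.range n).foldl (fun r j => if P j then r.set j 0 else r) r)[j']? =
      if j' < n ∧ P j' ∧ j' < r.length then some 0 else r[j']? := by
  induction n with
  | zero => intro j'; simp
  | succ n ih =>
    intro j'
    have hlen := foldl_ifset_length P r n
    simp only [List.range_succ, List.foldl_append, List.foldl_cons, List.foldl_nil]
    by_cases hp : P n
    · rw [if_pos hp, List.getElem?_set, hlen]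
      by_cases h : n = j'
      · subst h
        by_cases hl : n < r.length
        · rw [if_pos rfl, if_pos hl, if_pos ⟨by omega, hp, hl⟩]
        · rw [if_pos rfl, if_neg hl, if_neg (by omega), List.getElem?_eq_none (by omega)]
      · rw [if_neg h, ih]
        by_cases hc : j' < n ∧ P j' ∧ j' < r.length
        · rw [if_pos hc, if_pos ⟨by omega, hc.2⟩]
        · rw [if_neg hc, if_neg (by rintro ⟨a, b, cc⟩; exact hc ⟨by omega, b, cc⟩)]
    · rw [if_neg hp, ih]
      by_cases hc : j' < n ∧ P j' ∧ j' < r.length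
      · rw [if_pos hc, if_pos ⟨by omega, hc.2⟩]
      · rw [if_neg hc, if_neg ?_]
        rintro ⟨a, b, cc⟩
        apply hc
        refine ⟨?_, b, cc⟩
        rcases Nat.lt_succ_iff_lt_or_eq.mp a with h' | h'
        · exact h'
        · exact absurd (h' ▸ b) hp

theorem bzero_get? (R c i : Nat) (r : List Int) (j' : Nat) :
    (bzero R c i r)[j']? =
      if j' < c ∧ (i = 0 ∨ i = R - 1 ∨ j' = 0 ∨ j' = c - 1) ∧ j' < r.length
      then some 0 else r[j']? := by
  exact foldl_ifset_get? (fun j => i = 0 ∨ i = R - 1 ∨ j = 0 ∨ j = c - 1) r c j'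

theorem row_agree (R c i : Nat) (r : List Int) (hc : 1 ≤ c) (hr : c ≤ r.length) :
    ((if i = 0 ∨ i = R - 1 then rowZ c r else r).set 0 0).set (c - 1) 0 = bzero R c i r := by
  apply List.ext_getElem?
  intro j'
  rw [bzero_get?]
  by_cases hb : i = 0 ∨ i = R - 1
  · rw [if_pos hb]
    simp only [List.getElem?_set, List.length_set, rowZ_length, rowZ_get?]
    split_ifs <;> first | rfl | omega
  · rw [if_neg hb]
    simp only [List.getElem?_set, List.length_set]
    split_ifs <;> first | rfl | omega

theorem ports_agree (matrix : List (List Int)) (hpre : Pre_set_boundary_zeros matrix) :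
    set_boundary_zeros matrix = set_boundary_zeros_alt matrix := by
  by_cases hg : matrix = [] ∨ matrix.headD [] = []
  · simp only [set_boundary_zeros, set_boundary_zeros_alt, if_pos hg]
  · simp only [set_boundary_zeros, set_boundary_zeros_alt, if_neg hg]
    have hne : matrix ≠ [] := fun h => hg (Or.inl h)
    have hrows : 1 ≤ matrix.length := by
      cases matrix with
      | nil => exact absurd rfl hne
      | cons a t => simp
    have hcols : 1 ≤ (matrix.headD []).length := by
      have : matrix.headD [] ≠ [] := fun h => hg (Or.inr h)
      cases h : matrix.headD [] with
      | nil => exact absurd h this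
      | cons a t => simp
    have hlen : ∀ row ∈ matrix, (matrix.headD []).length ≤ row.length := by
      rcases hpre with h | h | h
      · exact absurd h hne
      · exact absurd h (fun h => hg (Or.inr h))
      · exact h
    apply List.ext_getElem?
    intro i'
    rw [fold2_get?, fold1_get? matrix matrix.length (matrix.headD []).length i',
        List.getElem?_mapIdx]
    by_cases hi : i' < matrix.length
    · rw [if_pos hi]
      have hr : matrix[i']? = some matrix[i'] := List.getElem?_eq_getElem hi
      have hmem : matrix[i'] ∈ matrix := List.getElem_mem hi
      have hrow := row_agree matrix.length (matrix.headD []).length i' matrix[i'] hcols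
        (hlen _ hmem)
      by_cases hb : i' = 0 ∨ i' = matrix.length - 1
      · rw [if_pos hb] at hrow ⊢
        rw [hr]
        simp only [Option.map_some]
        exact congrArg some hrow
      · rw [if_neg hb] at hrow ⊢
        rw [hr]
        simp only [Option.map_some]
        exact congrArg some hrow
    · rw [if_neg hi]
      have hn : matrix[i']? = none := List.getElem?_eq_none (by omega)
      rw [hn]
      split_ifs <;> rfl

-- ===== VERDICT (by name: the statement is the Claim_ definition above) =====
theorem set_boundary_zeros_spec : Claim_equal_set_boundary_zeros := by
  intro matrix _ hpre
  unfold Spec_set_boundary_zeros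
  exact ports_agree matrix hpre
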